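-- pv_equiv track=rewrite | github.com/KelianB/tab-gen | backend/file_generator/atex_generator.py | generate_allChords
-- ===== SOURCE A (Python) =====
-- def generate_allChords(allChords):
-- 	string = ""
-- 	count = 0
-- 	for chord in allChords:
-- 		string += generate_chord(chord) + '.8 '
-- 		count += 1
-- 		if count == 8 :
-- 			string += "|\n"
-- 			count = 0
--
-- 	return string
--
-- def generate_chord(chord):
--
-- 	if chord == [0,0,0,0,0,0]:
-- 		string = "r"
-- 		return string
--
-- 	strings_played = [x for x in chord if x > 0]
-- 	if len(strings_played) > 1:
-- 		string = ""
-- 		count = 6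
-- 		for keys in chord:
-- 			if keys != 0:
-- 				string += str(keys-1) + '.' + str(count) + ' '
-- 			count -= 1
-- 		string = "(" + string[0:-1] + ")"
--
-- 	else:
-- 		chord = list(reversed(chord))
-- 		string = str(max(chord)-1) + '.' + str(chord.index(max(chord))+1)
--
-- 	return string
-- ===== SOURCE B (Python) =====
-- # B: staged passes -- format all chords into tokens first, then build every bar
-- # line by slicing and emit the separators with a single "|\n".join (no per-chord
-- # counter and no conditional separator); generate_chord finds the note without
-- # reversing the list, via a forward last-occurrence-of-max scan.
-- def generate_chord(chord):
--     if chord == [0, 0, 0, 0, 0, 0]: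
--         return "r"
--     if sum(f > 0 for f in chord) > 1:
--         return "(" + " ".join("%d.%d" % (f - 1, 6 - i) for i, f in enumerate(chord) if f != 0) + ")"
--     m = j = None
--     for i, f in enumerate(chord):
--         if m is None or f >= m:
--             m, j = f, i
--     return "%d.%d" % (m - 1, len(chord) - j)
--
-- def generate_allChords(allChords):
--     toks = [generate_chord(c) + '.8 ' for c in allChords]
--     return "|\n".join("".join(toks[k:k + 8]) for k in range(0, len(toks) + 1, 8))
-- ===== Notes on version B (the rewrite author's own statement) =====
-- stated objective: alternative
-- what changed: B works in staged passes: it first formats every chord into a token list, then builds each bar line by slicing that list and emits all bar separators with a single '|\n'.join over the lines (including a possibly empty trailing line), with no running counter and no conditional separator; generate_chord finds the single note by one forward last-occurrence-of-max scan instead of reversing the chord and calling max plus index, and assembles the multi-note chord with join over enumerate instead of trailing-space-then-slice.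
import Mathlib
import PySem

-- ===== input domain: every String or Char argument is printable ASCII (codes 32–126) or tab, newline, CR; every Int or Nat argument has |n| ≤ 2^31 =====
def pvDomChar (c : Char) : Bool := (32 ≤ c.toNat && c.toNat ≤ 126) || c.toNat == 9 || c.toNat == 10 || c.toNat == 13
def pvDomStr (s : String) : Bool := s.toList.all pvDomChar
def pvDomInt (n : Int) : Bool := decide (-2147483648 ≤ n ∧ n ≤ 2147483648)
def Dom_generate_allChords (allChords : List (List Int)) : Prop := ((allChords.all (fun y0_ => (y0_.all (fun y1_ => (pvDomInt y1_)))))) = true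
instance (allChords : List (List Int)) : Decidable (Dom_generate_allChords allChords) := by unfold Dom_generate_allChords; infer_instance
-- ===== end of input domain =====

-- B stages the work (tokens first, then bar lines by slicing, separators by one join with "|\n" and
-- no per-chord counter or conditional) and formats the single note by a forward last-max scan with no
-- reversal (alternative decomposition, same cost). Pre_ excludes inputs with an empty chord (A raises).


-- ===== PORT A =====
def generate_chord (chord : List Int) : String :=
  if chord = [0, 0, 0, 0, 0, 0] then "r"
  else
    let strings_played := chord.filter (fun x => 0 < x)
    if strings_played.length > 1 then
      let st := chord.foldl
        (fun (p : String × Int) keys =>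
          (if keys ≠ 0 then p.1 ++ PySem.Int.toStr (keys - 1) ++ "." ++ PySem.Int.toStr p.2 ++ " " else p.1,
           p.2 - 1)) ("", 6)
      "(" ++ PySem.Str.slice st.1 (some 0) (some (-1)) ++ ")"
    else
      let chord2 := chord.reverse
      -- max([]) / [].index raise ValueError in Python on an empty chord: such inputs are outside Pre_
      let m := (PySem.List.max? chord2 (fun y => y)).getD 0
      PySem.Int.toStr (m - 1) ++ "." ++ PySem.Int.toStr ((((PySem.List.index? chord2 m).getD 0 : Nat) : Int) + 1)

def generate_allChords (allChords : List (List Int)) : String :=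
  (allChords.foldl
    (fun (st : String × Int) chord =>
      let s := st.1 ++ generate_chord chord ++ ".8 "
      let c := st.2 + 1
      if c = 8 then (s ++ "|\n", 0) else (s, c)) ("", 0)).1

-- ===== PORT B =====
-- part of the multi-note chord string contributed by the enumerated entry p (skips zeros)
def pvPartFn (p : Int × Int) : Option String :=
  if p.2 ≠ 0 then some (PySem.Int.toStr (p.2 - 1) ++ "." ++ PySem.Int.toStr (6 - p.1)) else none

-- the 'if m is None or f >= m' update of B's forward last-max scan (acc = (m, j))
def pvLastMaxStep (acc : Option (Int × Int)) (p : Int × Int) : Option (Int × Int) :=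
  match acc with
  | none => some (p.2, p.1)
  | some (m, j) => if m ≤ p.2 then some (p.2, p.1) else some (m, j)

def generate_chord_alt (chord : List Int) : String :=
  if chord = [0, 0, 0, 0, 0, 0] then "r"
  else if (chord.map (fun f => if 0 < f then (1 : Int) else 0)).sum > 1 then
    "(" ++ PySem.Str.join " " ((PySem.List.enumerate chord 0).filterMap pvPartFn) ++ ")"
  else
    match (PySem.List.enumerate chord 0).foldl pvLastMaxStep none with
    | some (m, j) => PySem.Int.toStr (m - 1) ++ "." ++ PySem.Int.toStr ((chord.length : Int) - j)
    | none => ""   -- empty chord: Python raises TypeError here ('m' is still None); outside Pre_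

-- one bar line of B: ''.join(toks[k:k+8])
def pvLine (toks : List String) (k : Int) : String :=
  PySem.Str.join "" (PySem.List.slice toks (some k) (some (k + 8)))

def generate_allChords_alt (allChords : List (List Int)) : String :=
  let toks := allChords.map (fun c => generate_chord_alt c ++ ".8 ")
  PySem.Str.join "|\n" ((PySem.List.pyRange 0 ((toks.length : Int) + 1) 8).map (pvLine toks))

-- ===== PRECONDITION & SPEC =====
-- Pre_ excludes inputs containing an empty chord: A raises ValueError there (max of an empty list)
def Pre_generate_allChords (allChords : List (List Int)) : Prop :=
  ∀ chord ∈ allChords, chord ≠ []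
instance (allChords : List (List Int)) : Decidable (Pre_generate_allChords allChords) := by
  unfold Pre_generate_allChords; infer_instance
def pvWitness_generate_allChords : List (List Int) :=
  [[0, 0, 0, 0, 0, 0], [1, 2, 0, 0, 0, 0], [0, 3, 0], [5], [-1, 0], [2, 2, 2], [7, 0, 0, 0, 0, 1], [1], [4, 4]]
def Spec_generate_allChords (allChords : List (List Int)) (out : String) : Prop := out = generate_allChords_alt allChords
instance (allChords : List (List Int)) (out : String) : Decidable (Spec_generate_allChords allChords out) := by unfold Spec_generate_allChords; infer_instance

-- ===== CLAIM (what is proved, stated in full; the proofs are below) =====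
def Claim_equal_generate_allChords : Prop := ∀ (allChords : List (List Int)), Dom_generate_allChords allChords → Pre_generate_allChords allChords → Spec_generate_allChords allChords (generate_allChords allChords)

-- ===== LEMMAS AND PROOFS =====

-- helper names for the loop bodies of port A (definitionally equal; cited by rfl)
def stepA (st : String × Int) (chord : List Int) : String × Int :=
  let s := st.1 ++ generate_chord chord ++ ".8 "
  let c := st.2 + 1
  if c = 8 then (s ++ "|\n", 0) else (s, c)

def stepP (p : String × Int) (keys : Int) : String × Int :=
  (if keys ≠ 0 then p.1 ++ PySem.Int.toStr (keys - 1) ++ "." ++ PySem.Int.toStr p.2 ++ " " else p.1,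
   p.2 - 1)

def catStrs (l : List String) : String := l.foldr (fun x acc => x ++ " " ++ acc) ""
def catA (l : List (List Int)) : String := l.foldr (fun ch acc => generate_chord ch ++ ".8 " ++ acc) ""

theorem genA_eq (l : List (List Int)) : generate_allChords l = (l.foldl stepA ("", 0)).1 := rfl

theorem stepA_eq (s' : String) (c : Int) (ch : List Int) :
    stepA (s', c) ch = if c + 1 = 8 then (s' ++ generate_chord ch ++ ".8 " ++ "|\n", 0)
      else (s' ++ generate_chord ch ++ ".8 ", c + 1) := rfl

theorem joinE_cons (p : String) (ps : List String) :
    PySem.Str.join "" (p :: ps) = p ++ PySem.Str.join "" ps := by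
  cases ps with
  | nil => apply String.toList_inj.mp; simp [PySem.Str.toList_join, PySem.Chars.join_singleton, PySem.Chars.join_nil]
  | cons q rest => apply String.toList_inj.mp; simp [PySem.Str.toList_join, PySem.Chars.join_cons_cons]

theorem joinBar_singleton (p : String) : PySem.Str.join "|\n" [p] = p := by
  apply String.toList_inj.mp
  simp [PySem.Str.toList_join, PySem.Chars.join_singleton]

theorem joinBar_cons (p q : String) (rest : List String) :
    PySem.Str.join "|\n" (p :: q :: rest) = p ++ "|\n" ++ PySem.Str.join "|\n" (q :: rest) := by
  apply String.toList_inj.mp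
  simp [PySem.Str.toList_join, PySem.Chars.join_cons_cons]

theorem catStrs_toList (p : String) (rest : List String) :
    (catStrs (p :: rest)).toList = PySem.Chars.join [' '] ((p :: rest).map String.toList) ++ [' '] := by
  induction rest generalizing p with
  | nil => simp [catStrs, PySem.Chars.join_singleton]
  | cons q rest ih =>
    have : catStrs (p :: q :: rest) = p ++ " " ++ catStrs (q :: rest) := rfl
    rw [this]
    simp only [List.map_cons] at ih ⊢
    rw [PySem.Chars.join_cons_cons]
    simp [ih q]

-- A's multi-note loop builds exactly B's parts, each followed by one space
theorem foldParts (l : List Int) (i0 : Int) (s : String) :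
    (l.foldl stepP (s, 6 - i0)).1 =
      s ++ catStrs ((PySem.List.enumerate l i0).filterMap pvPartFn) := by
  induction l generalizing i0 s with
  | nil => simp [catStrs, PySem.List.enumerate]
  | cons f t ih =>
    rw [PySem.List.enumerate_cons]
    by_cases hf : f ≠ 0
    · have hstep : stepP (s, 6 - i0) f =
        (s ++ PySem.Int.toStr (f - 1) ++ "." ++ PySem.Int.toStr (6 - i0) ++ " ", 6 - (i0 + 1)) := by
        simp [stepP, hf]; ring
      rw [List.foldl_cons, hstep, ih (i0 + 1)]
      rw [List.filterMap_cons]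
      have : pvPartFn (i0, f) = some (PySem.Int.toStr (f - 1) ++ "." ++ PySem.Int.toStr (6 - i0)) := by
        simp [pvPartFn, hf]
      rw [this]
      have : catStrs ((PySem.Int.toStr (f - 1) ++ "." ++ PySem.Int.toStr (6 - i0)) ::
          (PySem.List.enumerate t (i0 + 1)).filterMap pvPartFn) =
          (PySem.Int.toStr (f - 1) ++ "." ++ PySem.Int.toStr (6 - i0)) ++ " " ++
          catStrs ((PySem.List.enumerate t (i0 + 1)).filterMap pvPartFn) := rfl
      rw [this]
      simp [String.append_assoc]
    · simp only [ne_eq, not_not] at hf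
      subst hf
      have hstep : stepP (s, 6 - i0) 0 = (s, 6 - (i0 + 1)) := by simp [stepP]; ring
      rw [List.foldl_cons, hstep, ih (i0 + 1), List.filterMap_cons]
      have : pvPartFn (i0, (0:Int)) = none := by simp [pvPartFn]
      rw [this]

theorem slice_catStrs (p : String) (rest : List String) :
    PySem.Str.slice (catStrs (p :: rest)) (some 0) (some (-1)) = PySem.Str.join " " (p :: rest) := by
  apply String.toList_inj.mp
  rw [PySem.Str.toList_slice, PySem.Chars.slice_eq_listSlice]
  rw [PySem.List.slice_zero_start, PySem.List.slice_to_neg_one]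
  rw [catStrs_toList, PySem.Str.toList_join]
  have : (" ").toList = [' '] := by decide
  rw [this, List.dropLast_concat]

-- B's forward scan yields the maximum together with its LAST index, as a pre/suf decomposition
theorem lastmax_spec (l : List Int) (hl : l ≠ []) :
    ∃ M pre suf, (PySem.List.enumerate l 0).foldl pvLastMaxStep none = some (M, (pre.length : Int)) ∧
      l = pre ++ M :: suf ∧ (∀ y ∈ suf, y < M) ∧ (∀ y ∈ l, y ≤ M) := by
  induction l using List.reverseRecOn with
  | nil => exact absurd rfl hl
  | append_singleton t y ih =>
    cases t with
    | nil =>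
      refine ⟨y, [], [], ?_, by simp, by simp, by simp⟩
      simp [PySem.List.enumerate_cons, PySem.List.enumerate_nil, pvLastMaxStep]
    | cons a t' =>
      obtain ⟨M, pre, suf, hfold, hdec, hsuf, hall⟩ := ih (by simp)
      rw [PySem.List.enumerate_append, List.foldl_append, hfold]
      simp only [PySem.List.enumerate_cons, PySem.List.enumerate_nil, List.foldl_cons, List.foldl_nil]
      by_cases hMy : M ≤ y
      · refine ⟨y, a :: t', [], ?_, by simp, by simp, ?_⟩
        · simp [pvLastMaxStep, hMy]
        · intro z hz
          rcases List.mem_append.mp hz with hz | hz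
          · exact le_trans (hall z hz) hMy
          · simp at hz; omega
      · refine ⟨M, pre, suf ++ [y], ?_, ?_, ?_, ?_⟩
        · simp [pvLastMaxStep, hMy]
        · rw [hdec]; simp
        · intro z hz
          rcases List.mem_append.mp hz with hz | hz
          · exact hsuf z hz
          · simp at hz; omega
        · intro z hz
          rcases List.mem_append.mp hz with hz | hz
          · exact hall z hz
          · simp at hz; omega

-- the two chord formatters agree on every nonempty chord
theorem chord_eq (c : List Int) (hc : c ≠ []) : generate_chord c = generate_chord_alt c := by
  by_cases h6 : c = [0, 0, 0, 0, 0, 0]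
  · simp [generate_chord, generate_chord_alt, h6]
  · have hcount : (c.map (fun f => if 0 < f then (1 : Int) else 0)).sum =
        ((c.filter (fun x => 0 < x)).length : Int) := by
      have h := PySem.List.sum_map_ite_one_zero (fun x : Int => decide (0 < x)) c
      simp only [decide_eq_true_eq] at h
      rw [h, List.countP_eq_length_filter]
    by_cases hlen : (c.filter (fun x => 0 < x)).length > 1
    · -- multi-note branch
      rw [generate_chord, generate_chord_alt, if_neg h6, if_neg h6]
      rw [if_pos hlen, if_pos (by rw [hcount]; exact_mod_cast hlen)]
      have hfold : (c.foldl stepP ("", 6)).1 =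
          "" ++ catStrs ((PySem.List.enumerate c 0).filterMap pvPartFn) := by
        have := foldParts c 0 ""
        norm_num at this ⊢
        exact this
      obtain ⟨x, hxmem, hxpos⟩ : ∃ x ∈ c, 0 < x := by
        rcases List.exists_mem_of_length_pos (l := c.filter (fun x => 0 < x)) (by omega) with ⟨y, hy⟩
        rw [List.mem_filter] at hy
        exact ⟨y, hy.1, by simpa using hy.2⟩
      have hne : (PySem.List.enumerate c 0).filterMap pvPartFn ≠ [] := by
        intro hnil
        rw [List.filterMap_eq_nil_iff] at hnil
        obtain ⟨kk, hk, hval⟩ := List.mem_iff_getElem.mp hxmem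
        have hmem := (PySem.List.mem_enumerate_iff c 0 ((0 : Int) + (kk : Int), x)).mpr
          ⟨kk, hk, by rw [hval]⟩
        have := hnil _ hmem
        simp [pvPartFn] at this
        omega
      obtain ⟨p, rest, hpr⟩ := List.exists_cons_of_ne_nil hne
      show "(" ++ PySem.Str.slice (c.foldl stepP ("", 6)).1 (some 0) (some (-1)) ++ ")" = _
      rw [hfold, String.empty_append, hpr, slice_catStrs]
    · -- single-note branch
      rw [generate_chord, generate_chord_alt, if_neg h6, if_neg h6]
      rw [if_neg hlen, if_neg (by rw [hcount]; intro h; exact hlen (by exact_mod_cast h))]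
      obtain ⟨M, pre, suf, hfold, hdec, hsuf, hall⟩ := lastmax_spec c hc
      rw [hfold]
      -- A's max over the reversed chord is M
      obtain ⟨x, t, hxt⟩ := List.exists_cons_of_ne_nil (by simpa using hc : c.reverse ≠ [])
      have hmaxA : PySem.List.max? c.reverse (fun y => y) = some (t.foldl max x) := by
        rw [hxt]; exact PySem.List.max?_id_cons x t
      have hmA_mem : t.foldl max x ∈ c := by
        have := PySem.List.max?_mem hmaxA
        rwa [List.mem_reverse] at this
      have hmA_max : ∀ y ∈ c.reverse, y ≤ t.foldl max x := PySem.List.max?_isMax hmaxA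
      have hMeq : t.foldl max x = M := by
        have h1 : t.foldl max x ≤ M := hall _ hmA_mem
        have h2 : M ≤ t.foldl max x := by
          apply hmA_max
          rw [List.mem_reverse, hdec]
          simp
        omega
      -- first index of M in the reversed chord is suf.length
      have hidx : PySem.List.index? c.reverse M = some suf.length := by
        rw [PySem.List.index?_eq_some_iff]
        refine ⟨suf.reverse, pre.reverse, ?_, by simp, ?_⟩
        · rw [hdec]; simp
        · intro hmem
          rw [List.mem_reverse] at hmem
          exact absurd rfl (ne_of_lt (hsuf M hmem))
      have hmax' : (PySem.List.max? c.reverse fun y => y) = some M := by rw [hmaxA, hMeq]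
      simp only [hmax', hidx, Option.getD_some]
      have hlenc : c.length = pre.length + 1 + suf.length := by rw [hdec]; simp; omega
      congr 1
      exact congrArg PySem.Int.toStr (by omega)

-- prefix of the accumulator string factors out of A's main loop
theorem foldA_prefix (l : List (List Int)) (s : String) (c : Int) :
    (l.foldl stepA (s, c)).1 = s ++ (l.foldl stepA ("", c)).1 ∧
    (l.foldl stepA (s, c)).2 = (l.foldl stepA ("", c)).2 := by
  induction l generalizing s c with
  | nil => simp
  | cons ch t ih =>
    simp only [List.foldl_cons, stepA_eq]
    by_cases h8 : c + 1 = 8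
    · rw [if_pos h8, if_pos h8]
      obtain ⟨h1, h2⟩ := ih (s ++ generate_chord ch ++ ".8 " ++ "|\n") 0
      obtain ⟨h1', h2'⟩ := ih ("" ++ generate_chord ch ++ ".8 " ++ "|\n") 0
      constructor
      · rw [h1, h1']; simp [String.append_assoc]
      · rw [h2, h2']
    · rw [if_neg h8, if_neg h8]
      obtain ⟨h1, h2⟩ := ih (s ++ generate_chord ch ++ ".8 ") (c + 1)
      obtain ⟨h1', h2'⟩ := ih ("" ++ generate_chord ch ++ ".8 ") (c + 1)
      constructor
      · rw [h1, h1']; simp [String.append_assoc]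
      · rw [h2, h2']

-- fewer than 8 remaining slots: no separator is emitted
theorem foldA_small (l : List (List Int)) (c : Int) (s : String)
    (h0 : 0 ≤ c) (h8 : c + l.length < 8) :
    l.foldl stepA (s, c) = (s ++ catA l, c + l.length) := by
  induction l generalizing c s with
  | nil => simp [catA]
  | cons ch t ih =>
    have hne : c + 1 ≠ 8 := by
      have : (0:Int) ≤ t.length := by positivity
      simp at h8
      omega
    rw [List.foldl_cons, stepA_eq, if_neg hne]
    rw [ih (c + 1) _ (by omega) (by simp at h8 ⊢; omega)]
    have : catA (ch :: t) = generate_chord ch ++ ".8 " ++ catA t := rfl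
    rw [this]
    simp only [Prod.mk.injEq]
    refine ⟨by simp [String.append_assoc], by simp only [List.length_cons]; push_cast; ring⟩

-- exactly filling the bar: the separator is emitted and the counter resets
theorem foldA_full (l : List (List Int)) (c : Int) (s : String)
    (h0 : 0 ≤ c) (hlt : c < 8) (h8 : c + l.length = 8) :
    l.foldl stepA (s, c) = (s ++ catA l ++ "|\n", 0) := by
  induction l generalizing c s with
  | nil => simp at h8; omega
  | cons ch t ih =>
    by_cases hc8 : c + 1 = 8
    · have ht : t = [] := by
        simp at h8
        have : t.length = 0 := by omega
        exact List.length_eq_zero_iff.mp this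
      subst ht
      rw [List.foldl_cons, stepA_eq, if_pos hc8, List.foldl_nil]
      have : catA [ch] = generate_chord ch ++ ".8 " ++ "" := rfl
      rw [this]
      simp [String.append_assoc]
    · rw [List.foldl_cons, stepA_eq, if_neg hc8]
      rw [ih (c + 1) _ (by omega) (by omega) (by simp at h8 ⊢; omega)]
      have : catA (ch :: t) = generate_chord ch ++ ".8 " ++ catA t := rfl
      rw [this]
      simp [String.append_assoc]

theorem catA_eq_join (l : List (List Int)) (h : ∀ c ∈ l, c ≠ []) :
    catA l = PySem.Str.join "" (l.map (fun c => generate_chord_alt c ++ ".8 ")) := by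
  induction l with
  | nil => rfl
  | cons ch t ih =>
    rw [List.map_cons, joinE_cons, ← ih (fun c hc => h c (List.mem_cons_of_mem _ hc))]
    have : catA (ch :: t) = generate_chord ch ++ ".8 " ++ catA t := rfl
    rw [this, chord_eq ch (h ch List.mem_cons_self)]

-- range(0, n+1, 8) is the 8·i for i ≤ n/8
theorem pyRange8 (n : Nat) :
    PySem.List.pyRange 0 ((n : Int) + 1) 8 = (List.range (n / 8 + 1)).map (fun i => ((8 * i : Nat) : Int)) := by
  rw [PySem.List.pyRange_of_pos 0 ((n : Int) + 1) (by norm_num)]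
  have hcnt : (if (0 : Int) < (n : Int) + 1 then (((n : Int) + 1 - 0 + 8 - 1) / 8).toNat else 0) = n / 8 + 1 := by
    rw [if_pos (by positivity)]
    omega
  rw [hcnt]
  apply List.map_congr_left
  intro k _
  push_cast
  ring

-- a line at position 8·k is a drop/take chunk of the tokens
theorem pvLine_chunk (toks : List String) (k : Nat) :
    pvLine toks ((8 * k : Nat) : Int) = PySem.Str.join "" ((toks.drop (8 * k)).take 8) := by
  unfold pvLine
  rw [PySem.List.slice_toNat toks (by positivity) (by positivity)]
  congr 1
  have h1 : (((8 * k : Nat) : Int)).toNat = 8 * k := by omega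
  have h2 : ((((8 * k : Nat) : Int)) + 8).toNat = 8 * k + 8 := by omega
  rw [h1, h2]
  congr 1
  omega

-- B's port with its let inlined and the tokens length rewritten
theorem altB_eq (l : List (List Int)) :
    generate_allChords_alt l = PySem.Str.join "|\n"
      ((PySem.List.pyRange 0 ((l.length : Int) + 1) 8).map
        (pvLine (l.map fun c => generate_chord_alt c ++ ".8 "))) := by
  show PySem.Str.join "|\n"
      ((PySem.List.pyRange 0 (((l.map fun c => generate_chord_alt c ++ ".8 ").length : Int) + 1) 8).map
        (pvLine (l.map fun c => generate_chord_alt c ++ ".8 "))) = _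
  rw [List.length_map]

-- recursive view of B's bar lines (proof helper)
def linesB (toks : List String) : List String :=
  if h : toks.length < 8 then [PySem.Str.join "" toks]
  else PySem.Str.join "" (toks.take 8) :: linesB (toks.drop 8)
termination_by toks.length
decreasing_by simp; omega

theorem linesB_ne_nil (toks : List String) : linesB toks ≠ [] := by
  rw [linesB]
  split <;> simp

-- the pyRange-and-slice lines of B are exactly the recursive chunks
theorem lines_eq (n : Nat) : ∀ (toks : List String), toks.length ≤ n →
    (PySem.List.pyRange 0 ((toks.length : Int) + 1) 8).map (pvLine toks) = linesB toks := by
  induction n with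
  | zero =>
    intro toks hl
    have h0 : toks = [] := List.length_eq_zero_iff.mp (Nat.le_zero.mp hl)
    subst h0
    simp only [List.length_nil]
    rw [pyRange8 0]
    simp only [Nat.zero_div, Nat.zero_add, List.range_one, List.map_cons, List.map_nil]
    rw [linesB, dif_pos (by simp), pvLine_chunk ([] : List String) 0]
    rfl
  | succ n ih =>
    intro toks hl
    rw [pyRange8 toks.length]
    by_cases hlen : toks.length < 8
    · have h8 : toks.length / 8 = 0 := Nat.div_eq_of_lt hlen
      rw [h8]
      simp only [Nat.zero_add, List.range_one, List.map_cons, List.map_nil]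
      rw [linesB, dif_pos hlen, pvLine_chunk toks 0]
      simp only [Nat.mul_zero, List.drop_zero]
      rw [List.take_of_length_le (by omega)]
    · push_neg at hlen
      have hdiv : toks.length / 8 = (toks.length - 8) / 8 + 1 := by omega
      rw [hdiv, List.range_succ_eq_map]
      simp only [List.map_cons, List.map_map]
      rw [linesB, dif_neg (by omega)]
      congr 1
      · rw [pvLine_chunk toks 0]
        simp
      · have hstep : List.map (pvLine toks ∘ ((fun i => ((8 * i : Nat) : Int)) ∘ Nat.succ))
            (List.range ((toks.length - 8) / 8 + 1))
            = List.map (pvLine (toks.drop 8) ∘ (fun i => ((8 * i : Nat) : Int)))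
            (List.range ((toks.length - 8) / 8 + 1)) := by
          apply List.map_congr_left
          intro i _
          show pvLine toks ((8 * (i + 1) : Nat) : Int) = pvLine (toks.drop 8) ((8 * i : Nat) : Int)
          rw [pvLine_chunk, pvLine_chunk, List.drop_drop]
          have h18 : 8 * (i + 1) = 8 + 8 * i := by omega
          rw [h18]
        rw [hstep]
        have hlen8 : (toks.drop 8).length = toks.length - 8 := by
          rw [List.length_drop]
        have hrec := ih (toks.drop 8) (by rw [hlen8]; omega)
        rw [pyRange8 (toks.drop 8).length, hlen8, List.map_map] at hrec
        exact hrec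

-- main loop equivalence, chunk by chunk
theorem mainA (n : Nat) : ∀ (l : List (List Int)), l.length ≤ n → (∀ c ∈ l, c ≠ []) →
    (l.foldl stepA ("", 0)).1 =
      PySem.Str.join "|\n" (linesB (l.map fun c => generate_chord_alt c ++ ".8 ")) := by
  induction n with
  | zero =>
    intro l hl _
    have : l = [] := List.length_eq_zero_iff.mp (Nat.le_zero.mp hl)
    subst this
    rw [List.map_nil, linesB, dif_pos (by simp), joinBar_singleton]
    apply String.toList_inj.mp
    simp [PySem.Str.toList_join, PySem.Chars.join_nil]
  | succ n ih =>
    intro l hl hne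
    by_cases hlen : l.length < 8
    · rw [foldA_small l 0 "" le_rfl (by omega)]
      rw [linesB, dif_pos (by rw [List.length_map]; omega), joinBar_singleton]
      simp only [String.empty_append]
      exact catA_eq_join l hne
    · push_neg at hlen
      rw [linesB, dif_neg (by rw [List.length_map]; omega)]
      obtain ⟨q, qs, hq⟩ := List.exists_cons_of_ne_nil
        (linesB_ne_nil ((l.map fun c => generate_chord_alt c ++ ".8 ").drop 8))
      rw [hq, joinBar_cons, ← hq]
      rw [← List.map_take, ← List.map_drop]
      rw [← catA_eq_join (l.take 8) (fun c hc => hne c (List.take_subset 8 l hc))]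
      have hsplit : l = l.take 8 ++ l.drop 8 := (List.take_append_drop 8 l).symm
      conv_lhs => rw [hsplit]
      rw [List.foldl_append]
      rw [foldA_full (l.take 8) 0 "" le_rfl (by omega) (by rw [List.length_take]; simp; omega)]
      obtain ⟨h1, _⟩ := foldA_prefix (l.drop 8) ("" ++ catA (l.take 8) ++ "|\n") 0
      rw [h1]
      rw [ih (l.drop 8) (by rw [List.length_drop]; omega)
        (fun c hc => hne c (List.drop_subset 8 l hc))]
      simp [String.append_assoc]

-- ===== VERDICT (by name: the statement is the Claim_ definition above) =====
theorem generate_allChords_spec : Claim_equal_generate_allChords := by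
  intro l _ hpre
  unfold Spec_generate_allChords
  rw [genA_eq, altB_eq]
  have hle := lines_eq (l.map fun c => generate_chord_alt c ++ ".8 ").length _ le_rfl
  rw [List.length_map] at hle
  rw [hle]
  exact mainA l.length l le_rfl hpre
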